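-- pv_equiv track=rewrite | github.com/4444J99/application-pipeline | scripts/monitor_pipeline.py | compute_exit_code
-- ===== SOURCE A (Python) =====
-- STATUS_WARN = "WARN"
--
-- STATUS_CRITICAL = "CRITICAL"
--
-- def compute_exit_code(results: list[dict], strict: bool) -> int:
--     """Compute CLI exit code based on result severities."""
--     if not strict:
--         return 0
--
--     statuses = {r.get("status") for r in results}
--     if STATUS_CRITICAL in statuses:
--         return 2
--     if STATUS_WARN in statuses:
--         return 1
--     return 0
-- ===== SOURCE B (Python) =====
-- STATUS_WARN = "WARN"
--
-- STATUS_CRITICAL = "CRITICAL"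
--
-- SEVERITY = {STATUS_CRITICAL: 2, STATUS_WARN: 1}
--
-- def compute_exit_code(results: list[dict], strict: bool) -> int:
--     """Compute CLI exit code based on result severities."""
--     if not strict:
--         return 0
--     return max((SEVERITY.get(r.get("status"), 0) for r in results), default=0)
-- ===== Notes on version B (the rewrite author's own statement) =====
-- stated objective: alternative
-- what changed: Replaces the set comprehension plus priority-ordered membership tests by a severity lattice: each status is mapped through a severity table (CRITICAL=2, WARN=1, other=0) and the exit code is the maximum severity, so the priority logic becomes arithmetic max instead of branching.
import Mathlib
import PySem

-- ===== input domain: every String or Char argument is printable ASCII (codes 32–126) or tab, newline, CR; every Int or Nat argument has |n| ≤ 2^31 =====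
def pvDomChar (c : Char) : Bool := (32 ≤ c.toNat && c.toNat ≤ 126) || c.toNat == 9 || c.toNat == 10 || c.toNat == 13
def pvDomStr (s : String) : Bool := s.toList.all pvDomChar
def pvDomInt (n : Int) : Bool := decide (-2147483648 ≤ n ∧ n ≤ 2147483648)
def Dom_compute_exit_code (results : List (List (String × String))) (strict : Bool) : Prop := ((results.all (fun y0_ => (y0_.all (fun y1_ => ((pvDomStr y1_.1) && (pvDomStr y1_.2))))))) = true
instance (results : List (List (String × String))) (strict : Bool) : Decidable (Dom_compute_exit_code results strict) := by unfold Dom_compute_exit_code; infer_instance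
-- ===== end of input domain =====

-- ===== PORT A =====
-- One-line note: B maps each status through a severity table (CRITICAL=2, WARN=1, other=0) and returns the maximum severity, replacing A's set plus ordered membership tests (objective: alternative).
def compute_exit_code (results : List (List (String × String))) (strict : Bool) : Int :=
  if !strict then 0
  else
    let statuses : PySem.Set (Option String) :=
      PySem.Set.ofList (results.map (fun r => PySem.Dict.get? (PySem.Dict.ofList r) "status"))
    if PySem.Set.contains statuses (some "CRITICAL") then 2
    else if PySem.Set.contains statuses (some "WARN") then 1
    else 0

-- ===== PORT B =====
-- SEVERITY.get(status, 0): the severity table lookup (a two-entry dict in Source B)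
def pvSeverity (s : Option String) : Int :=
  PySem.Dict.getD (PySem.Dict.ofList [(some "CRITICAL", (2 : Int)), (some "WARN", 1)]) s 0

-- max(gen, default=0): all severities are ≥ 0, so the max with default 0 is a fold of max from 0 (exact here)
def compute_exit_code_alt (results : List (List (String × String))) (strict : Bool) : Int :=
  if !strict then 0
  else (results.map (fun r => pvSeverity (PySem.Dict.get? (PySem.Dict.ofList r) "status"))).foldl max 0

-- ===== PRECONDITION & SPEC =====
def Spec_compute_exit_code (results : List (List (String × String))) (strict : Bool) (out : Int) : Prop := out = compute_exit_code_alt results strict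
instance (results : List (List (String × String))) (strict : Bool) (out : Int) : Decidable (Spec_compute_exit_code results strict out) := by unfold Spec_compute_exit_code; infer_instance

-- ===== CLAIM (what is proved, stated in full; the proofs are below) =====
def Claim_equal_compute_exit_code : Prop := ∀ (results : List (List (String × String))) (strict : Bool), Dom_compute_exit_code results strict → Spec_compute_exit_code results strict (compute_exit_code results strict)

-- ===== LEMMAS AND PROOFS =====

-- A-style code of a list of statuses
def pvCode (l : List (Option String)) : Int :=
  if l.contains (some "CRITICAL") then 2
  else if l.contains (some "WARN") then 1
  else 0

theorem pvSeverity_eval (s : Option String) :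
    pvSeverity s = if s = some "CRITICAL" then 2 else if s = some "WARN" then 1 else 0 := by
  by_cases h1 : s = some "CRITICAL"
  · subst h1; decide
  · by_cases h2 : s = some "WARN"
    · subst h2; decide
    · have h1' : ((some "CRITICAL" : Option String) == s) = false := by
        cases e : (some "CRITICAL" : Option String) == s
        · rfl
        · exact absurd (eq_of_beq e).symm h1
      have h2' : ((some "WARN" : Option String) == s) = false := by
        cases e : (some "WARN" : Option String) == s
        · rfl
        · exact absurd (eq_of_beq e).symm h2
      simp [pvSeverity, PySem.Dict.getD, PySem.Dict.get?, PySem.Dict.ofList, PySem.Dict.update,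
            PySem.Dict.insert, PySem.Dict.empty, PySem.Dict.contains,
            List.find?, h1', h2', if_neg h1, if_neg h2]

theorem pvFold_eq_code (rs : List (List (String × String))) (a : Int) (ha : 0 ≤ a) :
    (rs.map (fun r => pvSeverity (PySem.Dict.get? (PySem.Dict.ofList r) "status"))).foldl max a
      = max a (pvCode (rs.map (fun r => PySem.Dict.get? (PySem.Dict.ofList r) "status"))) := by
  induction rs generalizing a with
  | nil => simp [pvCode]; omega
  | cons rr t ih =>
    have hsev : 0 ≤ pvSeverity (PySem.Dict.get? (PySem.Dict.ofList rr) "status") := by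
      rw [pvSeverity_eval]; split_ifs <;> omega
    simp only [List.map_cons, List.foldl_cons]
    rw [ih _ (by omega)]
    set s := PySem.Dict.get? (PySem.Dict.ofList rr) "status" with hs
    simp only [pvCode, List.contains_cons, pvSeverity_eval]
    clear_value s
    by_cases h1 : s = some "CRITICAL"
    · simp only [h1]
      have : ((some "CRITICAL" : Option String) == some "CRITICAL") = true := by decide
      simp only [this, Bool.true_or]
      split_ifs <;> omega
    · have h1' : ((some "CRITICAL" : Option String) == s) = false := by
        cases e : (some "CRITICAL" : Option String) == s
        · rfl
        · exact absurd (eq_of_beq e).symm h1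
      by_cases h2 : s = some "WARN"
      · simp only [h2] at h1' ⊢
        have : ((some "WARN" : Option String) == some "WARN") = true := by decide
        simp only [h1', this, Bool.false_or, Bool.true_or, if_neg (by decide : ¬ (some "WARN" : Option String) = some "CRITICAL")]
        split_ifs <;> omega
      · have h2' : ((some "WARN" : Option String) == s) = false := by
          cases e : (some "WARN" : Option String) == s
          · rfl
          · exact absurd (eq_of_beq e).symm h2
        simp only [h1', h2', Bool.false_or, if_neg h1, if_neg h2]
        split_ifs <;> omega

theorem pvSet_contains_ofList {α : Type} [BEq α] [LawfulBEq α] (xs : List α) (v : α) :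
    PySem.Set.contains (PySem.Set.ofList xs) v = xs.contains v := by
  simp only [PySem.Set.contains_eq_listContains]
  rw [Bool.eq_iff_iff]
  simp [PySem.Set.mem_ofList]

-- ===== VERDICT (by name: the statement is the Claim_ definition above) =====
theorem compute_exit_code_spec : Claim_equal_compute_exit_code := by
  intro results strict _
  unfold Spec_compute_exit_code compute_exit_code compute_exit_code_alt
  cases strict with
  | false => rfl
  | true =>
    simp only [Bool.not_true, if_neg (by decide : ¬ (false = true))]
    rw [pvFold_eq_code _ _ le_rfl, pvSet_contains_ofList, pvSet_contains_ofList]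
    unfold pvCode
    split_ifs <;> omega
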